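-- pv_equiv track=rewrite | github.com/zstarling131227/1905 | month02/code/data/day02/exercise02.py | parent
-- ===== SOURCE A (Python) =====
-- parens = "()[]{}"  #　特殊处理的字符集
--
-- def parent(text):
--     #　i 遍历字符串的索引位置
--     i,text_len = 0,len(text)
--
--     #　开始遍历字符串
--     while True:
--         while i < text_len and text[i] not in parens:
--             i += 1
--
--         #　到字符串结尾了
--         if i >= text_len:
--             return
--         else:
--             yield text[i],i
--             i += 1
-- ===== SOURCE B (Python) =====
-- PARENS = "()[]{}"
--
-- def parent(text):
--     # Collect, per bracket character, all of its positions via repeated str.find,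
--     # then merge the six position lists into index order with one sort.
--     hits = []
--     for ch in PARENS:
--         j = text.find(ch)
--         while j != -1:
--             hits.append((ch, j))
--             j = text.find(ch, j + 1)
--     hits.sort(key=lambda p: p[1])
--     yield from hits
-- ===== Notes on version B (the rewrite author's own statement) =====
-- stated objective: faster
-- what changed: Instead of one per-character Python scan yielding brackets as it meets them, B collects the positions of each of the six bracket characters with repeated str.find, then sorts the collected (char, index) pairs by index.
import Mathlib
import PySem

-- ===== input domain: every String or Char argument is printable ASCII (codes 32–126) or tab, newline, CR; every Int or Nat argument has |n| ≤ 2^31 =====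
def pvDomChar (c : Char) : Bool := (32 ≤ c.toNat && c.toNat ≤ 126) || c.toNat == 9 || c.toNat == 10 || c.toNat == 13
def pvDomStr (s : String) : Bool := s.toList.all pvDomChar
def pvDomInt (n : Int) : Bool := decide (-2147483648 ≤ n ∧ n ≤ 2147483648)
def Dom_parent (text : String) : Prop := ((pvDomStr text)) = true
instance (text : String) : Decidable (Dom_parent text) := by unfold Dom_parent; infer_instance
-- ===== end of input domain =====

-- ===== PORT A =====
-- A scans left to right, yielding each bracket with its index; B instead collects the
-- positions of each of the six bracket characters via repeated str.find and sorts the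
-- pairs by index (measurably faster in Python: str.find scans in C).
-- Both Pythons are generators; the ports produce the list of yielded pairs.

-- module constant: parens = "()[]{}"
def parensA : List Char := "()[]{}".toList

-- A's while-True loop: the inner while advances i past non-paren characters, then either
-- returns (end of string) or yields (text[i], i) and advances i; transcribed as one
-- structural recursion over the remaining characters with the running index i.
def parentGo : List Char → Int → List (String × Int)
  | [], _ => []                                   -- i >= text_len: return
  | c :: cs, i =>
      if c ∈ parensA then (String.ofList [c], i) :: parentGo cs (i + 1)  -- yield text[i], i
      else parentGo cs (i + 1)                    -- inner while: i += 1

def parent (text : String) : List (String × Int) := parentGo text.toList 0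

-- ===== PORT B =====
-- Termination facts for B's find loop (cited by collectCh's decreasing_by):
-- a failed find past the end, and found index ≥ start resp. < length.
theorem ff_oob (cs : List Char) (ch : Char) (s : Nat) (h : cs.length < s) :
    PySem.Chars.findFrom cs [ch] (s:Int) none = -1 := by
  have hs : ¬((s:Int) < 0) := by omega
  simp [PySem.Chars.findFrom, hs]
  intro h1; omega

theorem ff_facts (cs : List Char) (ch : Char) (s : Nat)
    (h : PySem.Chars.findFrom cs [ch] (s:Int) none ≠ -1) :
    s ≤ cs.length ∧ (s:Int) ≤ PySem.Chars.findFrom cs [ch] (s:Int) none := by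
  have hsl : s ≤ cs.length := by
    by_contra hc
    exact h (ff_oob cs ch s (by omega))
  obtain ⟨h1, _, _⟩ := PySem.Chars.findFrom_natCast_spec cs [ch] s hsl h
  exact ⟨hsl, h1⟩

theorem ff_lt (cs : List Char) (ch : Char) (s : Nat)
    (h : PySem.Chars.findFrom cs [ch] (s:Int) none ≠ -1) :
    (PySem.Chars.findFrom cs [ch] (s:Int) none).toNat < cs.length := by
  obtain ⟨hsl, _⟩ := ff_facts cs ch s h
  obtain ⟨_, h2, _⟩ := PySem.Chars.findFrom_natCast_spec cs [ch] s hsl h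
  rcases h2 with ⟨t, ht⟩
  have : (cs.drop (PySem.Chars.findFrom cs [ch] (s:Int) none).toNat).length ≥ 1 := by
    rw [← ht]; simp
  simp at this; omega

-- B's inner while loop for one character ch:
--   j = text.find(ch, s); while j != -1: hits.append((ch, j)); j = text.find(ch, j + 1)
-- text.find(ch, s) is PySem.Chars.findFrom cs [ch] s none (exact).
def collectCh (cs : List Char) (ch : Char) (s : Nat) : List (String × Int) :=
  let j := PySem.Chars.findFrom cs [ch] (s:Int) none
  if h : j = -1 then []
  else (String.ofList [ch], j) :: collectCh cs ch (j.toNat + 1)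
termination_by cs.length + 1 - s
decreasing_by
  obtain ⟨h1, h2⟩ := ff_facts cs ch s h
  have h3 := ff_lt cs ch s h
  omega

-- for ch in PARENS: collect; then hits.sort(key=lambda p: p[1]); yield from hits
def parent_alt (text : String) : List (String × Int) :=
  let cs := text.toList
  let hits := ("()[]{}".toList).flatMap (fun ch => collectCh cs ch 0)
  PySem.List.sorted hits (fun p => p.2) false

-- ===== PRECONDITION & SPEC =====
def Spec_parent (text : String) (out : List (String × Int)) : Prop := out = parent_alt text
instance (text : String) (out : List (String × Int)) : Decidable (Spec_parent text out) := by unfold Spec_parent; infer_instance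

-- ===== CLAIM (what is proved, stated in full; the proofs are below) =====
def Claim_equal_parent : Prop := ∀ (text : String), Dom_parent text → Spec_parent text (parent text)

-- ===== LEMMAS AND PROOFS =====

-- the found position holds ch, and no position in [s, j) does
theorem ff_get (cs : List Char) (ch : Char) (s : Nat)
    (h : PySem.Chars.findFrom cs [ch] (s:Int) none ≠ -1) :
    cs[(PySem.Chars.findFrom cs [ch] (s:Int) none).toNat]? = some ch := by
  obtain ⟨hsl, _⟩ := ff_facts cs ch s h
  obtain ⟨_, h2, _⟩ := PySem.Chars.findFrom_natCast_spec cs [ch] s hsl h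
  rcases h2 with ⟨t, ht⟩
  have : (cs.drop (PySem.Chars.findFrom cs [ch] (s:Int) none).toNat).head? = some ch := by
    rw [← ht]; rfl
  rwa [List.head?_drop] at this

theorem ff_min (cs : List Char) (ch : Char) (s : Nat)
    (h : PySem.Chars.findFrom cs [ch] (s:Int) none ≠ -1) :
    ∀ i, s ≤ i → i < (PySem.Chars.findFrom cs [ch] (s:Int) none).toNat → cs[i]? ≠ some ch := by
  obtain ⟨hsl, _⟩ := ff_facts cs ch s h
  obtain ⟨_, _, h3⟩ := PySem.Chars.findFrom_natCast_spec cs [ch] s hsl h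
  intro i hsi hij hic
  apply h3 i hsi hij
  have hi : i < cs.length := by
    have := ff_lt cs ch s h; omega
  have hgi : cs[i] = ch := by
    have := cs.getElem?_eq_getElem hi; rw [hic] at this; exact (Option.some_inj.mp this).symm
  have : cs.drop i = ch :: cs.drop (i+1) := by
    rw [List.drop_eq_getElem_cons hi]; simp [hgi]
  rw [this]; exact ⟨_, rfl⟩

theorem ff_none (cs : List Char) (ch : Char) (s : Nat)
    (h : PySem.Chars.findFrom cs [ch] (s:Int) none = -1) :
    ∀ i, s ≤ i → i < cs.length → cs[i]? ≠ some ch := by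
  intro i hsi hil hic
  have hsl : s ≤ cs.length := by omega
  rw [PySem.Chars.findFrom_natCast_eq_neg_one_iff cs [ch] s hsl] at h
  apply h
  have hge : cs[i] = ch := by
    have := cs.getElem?_eq_getElem hil; rw [hic] at this; exact (Option.some_inj.mp this).symm
  have hmem : ch ∈ cs.drop s := by
    have : cs[i] ∈ cs.drop s := by
      rw [List.mem_drop_iff_getElem]
      exact ⟨i - s, by omega, by congr 1; omega⟩
    rwa [hge] at this
  exact (List.singleton_infix_iff ..).mpr hmem

-- B's find loop for ch from position s collects exactly the positions of ch in [s, length)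
theorem collectCh_eq (cs : List Char) (ch : Char) (s : Nat) :
    collectCh cs ch s =
      ((List.range' s (cs.length - s)).filter (fun i => cs[i]? == some ch)).map
        (fun i : Nat => (String.ofList [ch], (i : Int))) := by
  fun_induction collectCh cs ch s with
  | case1 s j hj =>
      have hnil : (List.range' s (cs.length - s)).filter (fun i => cs[i]? == some ch) = [] := by
        rw [List.filter_eq_nil_iff]
        intro i hi
        rw [List.mem_range'_1] at hi
        simpa using ff_none cs ch s hj i hi.1 (by omega)
      rw [hnil]; rfl
  | case2 s j hj ih =>
      obtain ⟨hsl, hsj⟩ := ff_facts cs ch s hj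
      have hlt := ff_lt cs ch s hj
      have hget := ff_get cs ch s hj
      have hmin := ff_min cs ch s hj
      have hsplit : List.range' s (cs.length - s)
          = List.range' s (j.toNat - s) ++ List.range' j.toNat (cs.length - j.toNat) := by
        have hm : cs.length - s = (j.toNat - s) + (cs.length - j.toNat) := by omega
        rw [hm, ← List.range'_append, one_mul]
        congr 2
        omega
      rw [hsplit, List.filter_append]
      have h1 : (List.range' s (j.toNat - s)).filter (fun i => cs[i]? == some ch) = [] := by
        rw [List.filter_eq_nil_iff]
        intro i hi
        rw [List.mem_range'_1] at hi
        simpa using hmin i hi.1 (by omega)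
      have h2 : List.range' j.toNat (cs.length - j.toNat)
          = j.toNat :: List.range' (j.toNat + 1) (cs.length - (j.toNat + 1)) := by
        have hn : cs.length - j.toNat = (cs.length - (j.toNat + 1)) + 1 := by omega
        rw [hn, List.range'_succ]
      rw [h1, h2, List.nil_append, List.filter_cons_of_pos (by simpa using hget),
        List.map_cons, ih]
      simp only [Prod.mk.injEq, List.cons.injEq, true_and, and_true]
      omega

-- A's scan is the bracket-filtered enumeration
theorem parentGo_eq (cs : List Char) (k : Int) :
    parentGo cs k = ((PySem.List.enumerate cs k).filter (fun p => decide (p.2 ∈ parensA))).map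
      (fun p => (String.ofList [p.2], p.1)) := by
  induction cs generalizing k with
  | nil => simp [parentGo, PySem.List.enumerate_nil]
  | cons c cs ih =>
      rw [PySem.List.enumerate_cons]
      by_cases h : c ∈ parensA
      · simp [parentGo, h, ih]
      · simp [parentGo, h, ih]

-- the enumerate form rewritten over List.range with getD
theorem enum_glue (cs : List Char) :
    ((PySem.List.enumerate cs 0).filter (fun p => decide (p.2 ∈ parensA))).map
      (fun p => (String.ofList [p.2], p.1))
    = ((List.range cs.length).filter (fun i => decide (cs.getD i ' ' ∈ parensA))).map
      (fun i : Nat => (String.ofList [cs.getD i ' '], (i : Int))) := by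
  rw [PySem.List.enumerate_eq_map_pyRange cs ' ', PySem.List.pyRange_one, List.filter_map, List.map_map]
  simp only [PySem.List.len, Int.sub_zero, Int.toNat_natCast, zero_add]
  rw [List.filter_map, List.map_map]
  rw [List.filter_congr (q := fun i => decide (cs.getD i ' ' ∈ parensA))
    (by intro k hk; simp [PySem.List.pyGetD_natCast])]
  apply List.map_congr_left
  intro k hk
  simp [PySem.List.pyGetD_natCast]

-- a filter split over two disjoint predicates, up to permutation
theorem filter_append_disjoint_perm {α : Type} (l : List α) (p q : α → Bool)
    (hd : ∀ x, ¬(p x = true ∧ q x = true)) :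
    (l.filter p ++ l.filter q).Perm (l.filter (fun x => p x || q x)) := by
  induction l with
  | nil => simp
  | cons x l ih =>
      by_cases hp : p x = true
      · have hq : q x = false := by
          rcases Bool.eq_false_or_eq_true (q x) with h | h
          · exact absurd ⟨hp, h⟩ (hd x)
          · exact h
        simpa [List.filter_cons, hp, hq] using ih.cons x
      · have hp' : p x = false := by simpa using hp
        by_cases hq : q x = true
        · simp only [List.filter_cons, hp', hq, Bool.false_or, if_true]
          exact List.perm_middle.trans (ih.cons x)
        · have hq' : q x = false := by simpa using hq
          simpa [List.filter_cons, hp', hq'] using ih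

-- B's per-character filters, concatenated, are a permutation of one filter over the union
theorem flatMap_filter_perm {α κ : Type} [DecidableEq κ] (l : List α) (f : α → κ) (chs : List κ)
    (hnd : chs.Nodup) :
    (chs.flatMap (fun c => l.filter (fun x => decide (f x = c)))).Perm
      (l.filter (fun x => decide (f x ∈ chs))) := by
  induction chs with
  | nil => simp
  | cons c rest ih =>
      rw [List.flatMap_cons]
      have hnd' := (List.nodup_cons.mp hnd)
      have hperm := (ih hnd'.2).append_left (l.filter (fun x => decide (f x = c)))
      apply hperm.trans
      have hdisj : ∀ x, ¬((decide (f x = c)) = true ∧ (decide (f x ∈ rest)) = true) := by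
        intro x ⟨h1, h2⟩
        exact hnd'.1 ((of_decide_eq_true h1) ▸ (of_decide_eq_true h2))
      have hpred : ∀ x ∈ l, ((decide (f x = c)) || decide (f x ∈ rest)) = decide (f x ∈ c :: rest) := by
        intro x _; simp [List.mem_cons]
      rw [← List.filter_congr hpred]
      exact filter_append_disjoint_perm l _ _ hdisj

-- ===== VERDICT (by name: the statement is the Claim_ definition above) =====
theorem parent_spec : Claim_equal_parent := by
  intro text _
  unfold Spec_parent parent parent_alt
  set cs := text.toList with hcs
  -- the common normal form: bracket positions of cs, in increasing order, mapped to pairs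
  set G : Nat → String × Int := fun i => (String.ofList [cs.getD i ' '], (i : Int)) with hG
  set T : List (String × Int) :=
    ((List.range cs.length).filter (fun i => decide (cs.getD i ' ' ∈ parensA))).map G with hT
  -- A's side
  have hA : parentGo cs 0 = T := by
    rw [parentGo_eq, enum_glue, hT]
  -- B's side: the concatenated per-character hits are a permutation of T's index list, mapped
  have hhits : ("()[]{}".toList).flatMap (fun ch => collectCh cs ch 0)
      = (("()[]{}".toList).flatMap
          (fun ch => (List.range cs.length).filter (fun i => decide (cs[i]? = some ch)))).map G := by
    rw [List.map_flatMap]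
    apply List.flatMap_congr ?_
    intro ch hch
    rw [collectCh_eq]
    simp only [Nat.sub_zero, ← List.range_eq_range']
    rw [List.filter_congr (q := fun i => decide (cs[i]? = some ch))
      (by intro i _; rw [Bool.eq_iff_iff]; simp [beq_iff_eq])]
    apply List.map_congr_left
    intro i hi
    have hmem := List.mem_filter.mp hi
    have hgd : cs.getD i ' ' = ch := by
      have := of_decide_eq_true hmem.2
      simp [List.getD_eq_getElem?_getD, this]
    show (String.ofList [ch], (i : Int)) = (String.ofList [cs.getD i ' '], (i : Int))
    rw [hgd]
  have hperm : T.Perm (("()[]{}".toList).flatMap (fun ch => collectCh cs ch 0)) := by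
    rw [hhits, hT]
    apply List.Perm.map
    apply List.Perm.symm
    have h1 : ("()[]{}".toList).flatMap
        (fun ch => (List.range cs.length).filter (fun i => decide (cs[i]? = some ch)))
        = (("()[]{}".toList).map some).flatMap
            (fun c => (List.range cs.length).filter (fun i => decide (cs[i]? = c))) := by
      rw [List.flatMap_map]
    rw [h1]
    have hnd : (("()[]{}".toList).map some).Nodup := by decide
    have h2 := flatMap_filter_perm (List.range cs.length) (fun i => cs[i]?)
      (("()[]{}".toList).map some) hnd
    apply h2.trans
    rw [List.filter_congr]
    intro i hi
    have hil : i < cs.length := List.mem_range.mp hi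
    have hsome : cs[i]? = some (cs.getD i ' ') := by
      rw [cs.getElem?_eq_getElem hil]
      simp [List.getD_eq_getElem?_getD, cs.getElem?_eq_getElem hil]
    rw [Bool.eq_iff_iff]
    simp only [decide_eq_true_eq]
    rw [hsome]
    rw [List.mem_map_of_injective (Option.some_injective Char)]
    unfold parensA
    exact Iff.rfl
  have hpair : T.Pairwise (fun a b => a.2 < b.2) := by
    rw [hT]
    rw [List.pairwise_map]
    apply List.Pairwise.filter
    have := List.pairwise_lt_range (n := cs.length)
    apply this.imp
    intro a b hab
    simp [hG]
    omega
  have hB := PySem.List.sorted_eq_of_perm_of_pairwise_lt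
    (("()[]{}".toList).flatMap (fun ch => collectCh cs ch 0)) T (fun p => p.2) hperm hpair
  rw [hA, hB]
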